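-- pv_equiv track=rewrite | github.com/Chirag-2007/Python-Practice-Questions | Question134.py | total_weight_jar
-- ===== SOURCE A (Python) =====
-- def total_weight_jar(jars):
--     length = len(jars)
--     i = 0
--     while i <= len(jars) - 3:
--         x,y,z = jars[i],jars[i+1],jars[i+2]
--         if (x+y+z) > 60:
--             jars.pop(i + 1)
--             i = max(i - 1, 0) # i ko 1 kam karo, lekin agar wo 0 se neeche ja raha ho to 0 hi rakho.
--         else:
--             i = i + 1
--
--     return jars
-- ===== SOURCE B (Python) =====
-- def total_weight_jar(jars):
--     stack = []
--     for z in jars: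
--         while len(stack) >= 2 and stack[-2] + stack[-1] + z > 60:
--             stack.pop()
--         stack.append(z)
--     jars[:] = stack
--     return jars
-- ===== Notes on version B (the rewrite author's own statement) =====
-- stated objective: faster
-- what changed: Replaced the rescanning while-loop (pop middle of a >60 triple, step index back) by a one-pass monotone stack: for each element pop the top while the top two plus it exceed 60, then push; same in-place mutation of jars.
import Mathlib
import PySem

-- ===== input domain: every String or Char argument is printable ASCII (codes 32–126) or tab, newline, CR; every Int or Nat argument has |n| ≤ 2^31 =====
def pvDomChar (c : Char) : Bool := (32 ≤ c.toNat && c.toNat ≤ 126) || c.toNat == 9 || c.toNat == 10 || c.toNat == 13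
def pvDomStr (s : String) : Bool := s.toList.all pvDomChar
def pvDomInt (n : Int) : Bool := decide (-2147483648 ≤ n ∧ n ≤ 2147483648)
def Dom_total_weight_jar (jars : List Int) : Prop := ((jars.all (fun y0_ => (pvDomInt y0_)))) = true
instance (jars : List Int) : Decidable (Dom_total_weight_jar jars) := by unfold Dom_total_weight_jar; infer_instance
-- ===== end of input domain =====

-- B replaces A's back-stepping rescanning loop by a one-pass monotone stack (equal
-- return value; both A and the Python B mutate the argument list in place the same
-- way, the Lean equivalence is about the returned value).

-- ===== PORT A =====
-- A's while loop: index i; triple x,y,z = jars[i],jars[i+1],jars[i+2] (inlined);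
-- if x+y+z > 60 pop jars[i+1] and i := max(i-1,0) (Nat subtraction), else i := i+1.
-- The fuel argument only makes the recursion structural: 2*len(jars)-i strictly
-- decreases on every iteration, so fuel 2*len(jars)+1 never runs out.
def awLoop (fuel : Nat) (jars : List Int) (i : Nat) : List Int :=
  match fuel with
  | 0 => jars
  | fuel + 1 =>
    if i + 3 ≤ jars.length then
      if jars.getD i 0 + jars.getD (i+1) 0 + jars.getD (i+2) 0 > 60 then
        awLoop fuel (jars.eraseIdx (i+1)) (i - 1)
      else
        awLoop fuel jars (i + 1)
    else jars

def total_weight_jar (jars : List Int) : List Int := awLoop (2 * jars.length + 1) jars 0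

-- ===== PORT B =====
-- Python B's inner while-loop (pop while the two below plus z exceed 60);
-- the stack is kept with its top (Python's stack[-1]) at the HEAD of the list.
def popStep (stack : List Int) (z : Int) : List Int :=
  match stack with
  | y :: x :: rest => if x + y + z > 60 then popStep (x :: rest) z else y :: x :: rest
  | s => s

def total_weight_jar_alt (jars : List Int) : List Int :=
  (jars.foldl (fun s z => z :: popStep s z) []).reverse

-- ===== PRECONDITION & SPEC =====
def Spec_total_weight_jar (jars : List Int) (out : List Int) : Prop := out = total_weight_jar_alt jars
instance (jars : List Int) (out : List Int) : Decidable (Spec_total_weight_jar jars out) := by unfold Spec_total_weight_jar; infer_instance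

-- ===== CLAIM (what is proved, stated in full; the proofs are below) =====
def Claim_equal_total_weight_jar : Prop := ∀ (jars : List Int), Dom_total_weight_jar jars → Spec_total_weight_jar jars (total_weight_jar jars)

-- ===== LEMMAS AND PROOFS =====

-- invariant of A's loop: every triple strictly left of position i sums to ≤ 60
def TriOk (l : List Int) (i : Nat) : Prop :=
  ∀ j, j < i → j + 3 ≤ l.length →
    l.getD j 0 + l.getD (j+1) 0 + l.getD (j+2) 0 ≤ 60

lemma key (n : Nat) : ∀ (l : List Int) (i : Nat), 2 * l.length - i < n → TriOk l i →
    (l.drop (i+2)).foldl (fun s z => z :: popStep s z) ((l.take (i+2)).reverse)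
      = (awLoop n l i).reverse := by
  induction n with
  | zero =>
    intro l i hn _
    exact absurd hn (Nat.not_lt_zero _)
  | succ n ih =>
    intro l i hn hInv
    by_cases h : i + 3 ≤ l.length
    · have hi : i < l.length := by omega
      have hi1 : i + 1 < l.length := by omega
      have hi2 : i + 2 < l.length := by omega
      set x := l.getD i 0 with hx
      set y := l.getD (i+1) 0 with hy
      set z := l.getD (i+2) 0 with hz
      have hdrop : l.drop (i+2) = z :: l.drop (i+3) := by
        rw [hz, List.getD_eq_getElem l 0 hi2]
        exact (List.getElem_cons_drop hi2).symm
      have htake1 : l.take (i+1) = l.take i ++ [x] := by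
        rw [hx, List.getD_eq_getElem l 0 hi]
        rw [List.take_add_one, List.getElem?_eq_getElem hi]
        simp
      have htake2 : l.take (i+2) = l.take (i+1) ++ [y] := by
        rw [hy, List.getD_eq_getElem l 0 hi1]
        rw [show i + 2 = i + 1 + 1 from rfl, List.take_add_one, List.getElem?_eq_getElem hi1]
        simp
      have hs : (l.take (i+2)).reverse = y :: x :: (l.take i).reverse := by
        rw [htake2, htake1]; simp
      rw [awLoop, if_pos h]
      by_cases hsum : x + y + z > 60
      · rw [if_pos hsum]
        set E := l.eraseIdx (i+1) with hE
        have hElen : E.length = l.length - 1 := by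
          simp [hE, List.length_eraseIdx, hi1]
        have hEget : ∀ k, k < i + 1 → E.getD k 0 = l.getD k 0 := by
          intro k hk
          have hkE : k < E.length := by omega
          rw [List.getD_eq_getElem _ _ hkE, List.getD_eq_getElem _ _ (by omega : k < l.length)]
          exact List.getElem_eraseIdx_of_lt hkE hk
        have hInv' : TriOk E (i - 1) := by
          intro j hj hjl
          have hj2 : j + 2 < i + 1 := by omega
          rw [hEget j (by omega), hEget (j+1) (by omega), hEget (j+2) (by omega)]
          exact hInv j (by omega) (by omega)
        have hEtd : E = l.take (i+1) ++ l.drop (i+2) := List.eraseIdx_eq_take_drop_succ l (i+1)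
        have hIH := ih E (i - 1) (by omega) hInv'
        rw [← hIH]
        have htlen : (l.take (i+1)).length = i + 1 := by
          simp [List.length_take]; omega
        cases i with
        | zero =>
          -- E.take 2 = [x, z], E.drop 2 = l.drop 3
          have hEtake : E.take 2 = [x, z] := by
            rw [hEtd, List.take_append, htlen, htake1]
            simp [hdrop]
          have hEdrop : E.drop 2 = l.drop 3 := by
            rw [hEtd, List.drop_append, htlen]
            simp [hdrop]
          simp only [hEtake, hEdrop, hdrop, hs, List.foldl_cons]
          have hpop : popStep (y :: x :: (l.take 0).reverse) z = [x] := by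
            rw [popStep]
            simp [hsum, popStep]
          rw [hpop]
          simp
        | succ k =>
          have hEtake : E.take (k + 1 - 1 + 2) = l.take (k+2) := by
            rw [show k + 1 - 1 + 2 = k + 2 from rfl, hEtd, List.take_append, htlen]
            simp [List.take_take]
          have hEdrop : E.drop (k + 1 - 1 + 2) = l.drop (k+3) := by
            rw [show k + 1 - 1 + 2 = k + 2 from rfl, hEtd, List.drop_append, htlen]
            have : (l.take (k+2)).length ≤ k + 2 := by simp [List.length_take]
            rw [List.drop_eq_nil_of_le this]
            simp [hdrop]
          rw [hEtake, hEdrop]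
          simp only [hdrop, hs, List.foldl_cons, htake1]
          have hpop : popStep (y :: x :: (l.take (k+1)).reverse) z
              = popStep (x :: (l.take (k+1)).reverse) z := by
            rw [popStep]; simp [hsum]
          rw [hpop]
          simp
      · rw [if_neg hsum]
        have hInv' : TriOk l (i + 1) := by
          intro j hj hjl
          rcases Nat.lt_succ_iff_lt_or_eq.mp hj with hj' | hj'
          · exact hInv j hj' hjl
          · subst hj'; omega
        have hIH := ih l (i + 1) (by omega) hInv'
        rw [← hIH]
        have htake3 : l.take (i+3) = l.take (i+2) ++ [z] := by
          rw [hz, List.getD_eq_getElem l 0 hi2]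
          rw [show i + 3 = i + 2 + 1 from rfl, List.take_add_one, List.getElem?_eq_getElem hi2]
          simp
        simp only [hdrop, List.foldl_cons, htake3, List.reverse_append]
        have hpop : popStep ((l.take (i+2)).reverse) z = (l.take (i+2)).reverse := by
          rw [hs, popStep]
          simp [hsum]
        rw [hpop]
        simp
    · rw [awLoop, if_neg h]
      have hlen : l.length ≤ i + 2 := by omega
      simp [List.drop_eq_nil_of_le hlen, List.take_of_length_le hlen]

lemma total_weight_jar_key (l : List Int) :
    total_weight_jar_alt l = total_weight_jar l := by
  match l with
  | [] =>
    rw [total_weight_jar, awLoop]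
    simp [total_weight_jar_alt]
  | [a] =>
    rw [total_weight_jar, awLoop]
    simp [total_weight_jar_alt, popStep]
  | a :: b :: t =>
    have h0 : TriOk (a :: b :: t) 0 := fun j hj _ => absurd hj (Nat.not_lt_zero j)
    have hk := key (2 * (a :: b :: t).length + 1) (a :: b :: t) 0 (by omega) h0
    simp only [List.drop_succ_cons, List.drop_zero, List.take_succ_cons, List.take_zero,
      List.reverse_cons, List.reverse_nil, List.nil_append, List.cons_append] at hk
    rw [total_weight_jar, total_weight_jar_alt]
    have hstep : (a :: b :: t).foldl (fun s z => z :: popStep s z) []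
        = t.foldl (fun s z => z :: popStep s z) [b, a] := by
      simp [List.foldl_cons, popStep]
    rw [hstep, hk]
    simp

-- ===== VERDICT (by name: the statement is the Claim_ definition above) =====
theorem total_weight_jar_spec : Claim_equal_total_weight_jar := by
  intro jars _
  unfold Spec_total_weight_jar
  exact (total_weight_jar_key jars).symm
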